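-- pv_equiv track=rewrite | github.com/llmsym/PathEval | data_analysis.py | attempt_times
-- ===== SOURCE A (Python) =====
-- def attempt_times(data):
--     n = 5
--     result = []
--     total = len(data) // n
--     for i in range(total):
--         attempt = 0
--         ntries = data[i*n:i*n+n]
--         res = False
--         for one in ntries:
--             res = res or one['pass']
--             if not res:
--                 attempt += 1
--         if res:
--             result.append(attempt+1)
--     counts = {
--         1: 0,
--         2: 0,
--         3: 0,
--         4: 0,
--         5: 0
--     }
--
--     for num in result:
--         if 1 <= num <= 5:
--             counts[num] += 1
--
--     return counts
-- ===== SOURCE B (Python) =====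
-- def attempt_times(data):
--     counts = {1: 0, 2: 0, 3: 0, 4: 0, 5: 0}
--     pos = 0
--     passed = False
--     for one in data[:len(data) // 5 * 5]:
--         if not passed and one['pass']:
--             counts[pos + 1] += 1
--             passed = True
--         pos += 1
--         if pos == 5:
--             pos = 0
--             passed = False
--     return counts
-- ===== Notes on version B (the rewrite author's own statement) =====
-- stated objective: alternative
-- what changed: B replaces A's nested loops over explicit 5-element slices plus a second tallying pass with a single flat pass over the truncated list driven by a mod-5 position/passed state machine that bumps the pre-built counts dict the moment a chunk's first pass is seen.
import Mathlib
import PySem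

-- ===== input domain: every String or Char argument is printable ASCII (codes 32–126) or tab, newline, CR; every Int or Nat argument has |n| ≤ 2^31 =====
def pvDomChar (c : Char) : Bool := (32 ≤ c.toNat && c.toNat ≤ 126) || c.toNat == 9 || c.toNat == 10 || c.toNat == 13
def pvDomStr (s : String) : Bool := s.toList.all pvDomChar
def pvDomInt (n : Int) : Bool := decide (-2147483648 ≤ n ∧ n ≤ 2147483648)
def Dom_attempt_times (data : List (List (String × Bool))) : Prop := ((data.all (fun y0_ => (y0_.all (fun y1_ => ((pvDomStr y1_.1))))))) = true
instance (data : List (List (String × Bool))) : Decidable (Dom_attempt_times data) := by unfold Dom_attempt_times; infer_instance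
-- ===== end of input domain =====

-- B replaces A's nested loops over explicit 5-element slices plus a second tallying pass with a
-- single flat pass over the truncated list driven by a mod-5 position/passed state machine that
-- bumps the pre-built counts dict at the moment a chunk's first pass is seen; objective: alternative.

-- ===== PORT A =====
-- one['pass'] is a dict lookup; KeyError (missing key) is excluded by Pre_attempt_times,
-- so getD with a default is exact on the admitted inputs.
def attempt_times (data : List (List (String × Bool))) : List (Int × Int) :=
  let n : Int := 5
  let total := PySem.Int.floordiv (data.length : Int) n
  let result : List Int :=
    (PySem.List.pyRange 0 total 1).foldl (fun result i =>
      let ntries := PySem.List.slice data (some (i*n)) (some (i*n+n))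
      let st := ntries.foldl (fun (st : Int × Bool) one =>
        let res := st.2 || PySem.Dict.getD (PySem.Dict.mk one) "pass" false
        ((if !res then st.1 + 1 else st.1), res)) (0, false)
      if st.2 then result ++ [st.1 + 1] else result) []
  let counts0 : PySem.Dict Int Int := PySem.Dict.ofList [(1,0),(2,0),(3,0),(4,0),(5,0)]
  let counts := result.foldl (fun counts num =>
      if 1 ≤ num ∧ num ≤ 5 then PySem.Dict.modify counts num 0 (· + 1) else counts) counts0
  counts.items

-- ===== PORT B =====
-- counts[pos+1] += 1 always hits an existing key (pos+1 ∈ 1..5), so modify is exact;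
-- 'not passed and one['pass']' short-circuits, so 'pass' is read exactly where A reads it.
def attempt_times_alt (data : List (List (String × Bool))) : List (Int × Int) :=
  let counts0 : PySem.Dict Int Int := PySem.Dict.ofList [(1,0),(2,0),(3,0),(4,0),(5,0)]
  let st :=
    (PySem.List.slice data none (some (PySem.Int.floordiv (data.length : Int) 5 * 5))).foldl
      (fun (st : PySem.Dict Int Int × Int × Bool) one =>
        let st' := if !st.2.2 && PySem.Dict.getD (PySem.Dict.mk one) "pass" false
                   then (PySem.Dict.modify st.1 (st.2.1 + 1) 0 (· + 1), st.2.1, true) else st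
        let p := st'.2.1 + 1
        if p == 5 then (st'.1, 0, false) else (st'.1, p, st'.2.2)) (counts0, 0, false)
  st.1.items

-- ===== PRECONDITION & SPEC =====
-- Pre_ excludes exactly the inputs where A raises KeyError: inside one of the 5-chunks an
-- element that is scanned before any passing one lacks the key "pass" (both programs stop
-- evaluating 'pass' after the first passing element, so later elements are unconstrained).
def Pre_attempt_times (data : List (List (String × Bool))) : Prop :=
  ∀ i < data.length / 5, ∀ j < 5,
    (∀ k < j, PySem.Dict.get? (PySem.Dict.mk (data.getD (i*5+k) [])) "pass" ≠ some true) →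
    (PySem.Dict.get? (PySem.Dict.mk (data.getD (i*5+j) [])) "pass").isSome
instance (data : List (List (String × Bool))) : Decidable (Pre_attempt_times data) := by
  unfold Pre_attempt_times; infer_instance

def pvWitness_attempt_times : (List (List (String × Bool))) :=
  [[("pass", true)], [], [], [], []]

def Spec_attempt_times (data : List (List (String × Bool))) (out : List (Int × Int)) : Prop := out = attempt_times_alt data
instance (data : List (List (String × Bool))) (out : List (Int × Int)) : Decidable (Spec_attempt_times data out) := by unfold Spec_attempt_times; infer_instance

-- ===== CLAIM (what is proved, stated in full; the proofs are below) =====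
def Claim_equal_attempt_times : Prop := ∀ (data : List (List (String × Bool))), Dom_attempt_times data → Pre_attempt_times data → Spec_attempt_times data (attempt_times data)

-- ===== LEMMAS AND PROOFS =====

-- "one['pass']" (with KeyError read as False; exact under Pre_)
def pvLookup (one : List (String × Bool)) : Bool :=
  PySem.Dict.getD (PySem.Dict.mk one) "pass" false

-- index of the first passing element of a chunk
def pvFirst : List (List (String × Bool)) → Option Nat
  | [] => none
  | d :: t => if pvLookup d then some 0 else (pvFirst t).map (· + 1)

theorem pvFirst_lt {l : List (List (String × Bool))} {j : Nat}
    (h : pvFirst l = some j) : j < l.length := by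
  induction l generalizing j with
  | nil => simp [pvFirst] at h
  | cons d t ih =>
    by_cases hp : pvLookup d
    · simp [pvFirst, hp] at h
      simp [List.length_cons]
      omega
    · simp [pvFirst, hp] at h
      obtain ⟨j', hj', rfl⟩ := h
      have := ih hj'
      simp
      omega

-- A's inner loop after res has become True
theorem stepA_true (l : List (List (String × Bool))) (a : Int) :
    l.foldl (fun (st : Int × Bool) one =>
        let res := st.2 || pvLookup one
        ((if !res then st.1 + 1 else st.1), res)) (a, true) = (a, true) := by
  induction l with
  | nil => rfl
  | cons d t ih => simpa using ih

-- A's inner loop computes (index of first pass, whether any pass)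
theorem stepA_spec (l : List (List (String × Bool))) (a : Int) :
    l.foldl (fun (st : Int × Bool) one =>
        let res := st.2 || pvLookup one
        ((if !res then st.1 + 1 else st.1), res)) (a, false)
      = (match pvFirst l with
         | some j => (a + (j : Int), true)
         | none => (a + (l.length : Int), false)) := by
  induction l generalizing a with
  | nil => simp [pvFirst]
  | cons d t ih =>
    rw [List.foldl_cons]
    by_cases hp : pvLookup d
    · have h1 : (let res := ((a : Int), false).2 || pvLookup d;
          ((if !res then ((a : Int), false).1 + 1 else ((a : Int), false).1), res))
          = ((a : Int), true) := by simp [hp]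
      rw [h1, stepA_true]
      simp [pvFirst, hp]
    · have h1 : (let res := ((a : Int), false).2 || pvLookup d;
          ((if !res then ((a : Int), false).1 + 1 else ((a : Int), false).1), res))
          = ((a + 1 : Int), false) := by simp [hp]
      rw [h1, ih]
      rcases h : pvFirst t with _ | j <;> simp [pvFirst, hp, h] <;> omega

-- the per-chunk outcome at a natural chunk index
def pvOutN (data : List (List (String × Bool))) (i : Nat) : Option Nat :=
  pvFirst ((data.drop (5*i)).take 5)

-- the per-chunk dict bump both programs perform
def pvBump (c : PySem.Dict Int Int) (o : Option Nat) : PySem.Dict Int Int :=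
  match o with
  | some j => PySem.Dict.modify c ((j : Int) + 1) 0 (· + 1)
  | none => c

-- counting fold of A's second loop
def pvCount (r : List Int) (c : PySem.Dict Int Int) : PySem.Dict Int Int :=
  r.foldl (fun counts num =>
      if 1 ≤ num ∧ num ≤ 5 then PySem.Dict.modify counts num 0 (· + 1) else counts) c

theorem pvCount_append (r : List Int) (v : Int) (c : PySem.Dict Int Int) :
    pvCount (r ++ [v]) c
      = (if 1 ≤ v ∧ v ≤ 5 then PySem.Dict.modify (pvCount r c) v 0 (· + 1) else pvCount r c) := by
  simp [pvCount, List.foldl_append]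

theorem slice_eq_chunk (data : List (List (String × Bool))) (i : Nat) :
    PySem.List.slice data (some ((i : Int)*5)) (some ((i : Int)*5+5)) = (data.drop (5*i)).take 5 := by
  rw [show ((i : Int)*5) = ((i*5 : Nat) : Int) by push_cast; ring,
      show ((i*5 : Nat) : Int) + 5 = ((i*5+5 : Nat) : Int) by push_cast; ring,
      PySem.List.slice_natCast]
  rw [show i*5+5 - i*5 = 5 by omega, Nat.mul_comm i 5]

-- fusion: counting the concatenated result list = bumping the dict chunk by chunk
theorem fuse (data : List (List (String × Bool))) (idxs : List Nat)
    (r0 : List Int) (c0 : PySem.Dict Int Int) :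
    pvCount (idxs.foldl (fun r i =>
        match pvOutN data i with
        | some j => r ++ [(j : Int) + 1]
        | none => r) r0) c0
      = idxs.foldl (fun c i => pvBump c (pvOutN data i)) (pvCount r0 c0) := by
  induction idxs generalizing r0 with
  | nil => rfl
  | cons i t ih =>
    simp only [List.foldl_cons]
    rcases h : pvOutN data i with _ | j
    · simp [pvBump, ih r0]
    · rw [ih (r0 ++ [(j:Int)+1])]
      congr 1
      rw [pvCount_append]
      have hj : j < 5 := by
        have := pvFirst_lt (l := (data.drop (5*i)).take 5) (h := h)
        have h5 : ((data.drop (5*i)).take 5).length ≤ 5 := by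
          simpa using List.length_take_le 5 (data.drop (5*i))
        omega
      have hb : (1:Int) ≤ (j:Int)+1 ∧ (j:Int)+1 ≤ 5 := ⟨by omega, by omega⟩
      simp [pvBump, hb]

-- A's outer loop produces the list of per-chunk outcomes
theorem loopA (data : List (List (String × Bool))) (idxs : List Nat) (r0 : List Int) :
    (idxs.map (Nat.cast : Nat → Int)).foldl (fun result i =>
      let ntries := PySem.List.slice data (some (i*5)) (some (i*5+5))
      let st := ntries.foldl (fun (st : Int × Bool) one =>
        let res := st.2 || pvLookup one
        ((if !res then st.1 + 1 else st.1), res)) (0, false)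
      if st.2 then result ++ [st.1 + 1] else result) r0
    = idxs.foldl (fun r i =>
        match pvOutN data i with
        | some j => r ++ [(j : Int) + 1]
        | none => r) r0 := by
  rw [List.foldl_map]
  apply List.foldl_ext
  intro r i _
  simp only [slice_eq_chunk, stepA_spec, pvOutN]
  rcases pvFirst ((data.drop (5*i)).take 5) with _ | j <;> simp

-- B's flat step function
def stepB (st : PySem.Dict Int Int × Int × Bool) (one : List (String × Bool)) :
    PySem.Dict Int Int × Int × Bool :=
  let st' := if !st.2.2 && pvLookup one
             then (PySem.Dict.modify st.1 (st.2.1 + 1) 0 (· + 1), st.2.1, true) else st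
  let p := st'.2.1 + 1
  if p == 5 then (st'.1, 0, false) else (st'.1, p, st'.2.2)

-- B's state machine after the chunk's first pass: it only counts positions until the reset
theorem stepB_passed (l : List (List (String × Bool))) (p : Int) (c : PySem.Dict Int Int)
    (hlt : p < 5) (hlen : p + l.length = 5) :
    l.foldl stepB (c, p, true) = (c, 0, false) := by
  induction l generalizing p with
  | nil => simp at hlen; omega
  | cons d t ih =>
    rw [List.foldl_cons]
    by_cases h5 : p + 1 = 5
    · have h0 : t.length = 0 := by simp at hlen; omega
      have ht : t = [] := List.length_eq_zero_iff.mp h0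
      subst ht
      simp [stepB, h5]
    · have h1 : stepB (c, p, true) d = (c, p + 1, true) := by
        simp [stepB]
        omega
      have hl2 : p + 1 + (t.length : Int) = 5 := by
        simp [List.length_cons] at hlen; omega
      rw [h1, ih (p+1) (by omega) hl2]

-- B's state machine through a full chunk starting unpassed at position p
theorem stepB_spec (l : List (List (String × Bool))) (p : Int) (c : PySem.Dict Int Int)
    (hp : 0 ≤ p) (hlt : p < 5) (hlen : p + l.length = 5) :
    l.foldl stepB (c, p, false)
      = (match pvFirst l with
         | some j => (PySem.Dict.modify c (p + (j : Int) + 1) 0 (· + 1), 0, false)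
         | none => (c, 0, false)) := by
  induction l generalizing p c with
  | nil => simp at hlen; omega
  | cons d t ih =>
    rw [List.foldl_cons]
    have hl2 : p + 1 + (t.length : Int) = 5 := by
      simp [List.length_cons] at hlen; push_cast at hlen ⊢; omega
    by_cases hd : pvLookup d
    · by_cases h5 : p + 1 = 5
      · have ht : t = [] := by
          exact List.length_eq_zero_iff.mp (by simp at hlen; omega)
        subst ht
        simp [stepB, hd, h5, pvFirst]
      · have h2 : stepB (c, p, false) d
            = (PySem.Dict.modify c (p + 1) 0 (· + 1), p + 1, true) := by
          simp [stepB, hd]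
          omega
        rw [h2, stepB_passed t (p+1) _ (by omega) hl2]
        simp [pvFirst, hd]
    · by_cases h5 : p + 1 = 5
      · have ht : t = [] := by
          exact List.length_eq_zero_iff.mp (by simp at hlen; omega)
        subst ht
        simp [stepB, hd, h5, pvFirst]
      · have h2 : stepB (c, p, false) d = (c, p + 1, false) := by
          simp [stepB, hd]
          omega
        rw [h2, ih (p+1) c (by omega) (by omega) hl2]
        rcases h : pvFirst t with _ | j
        · simp [pvFirst, hd, h]
        · simp only [pvFirst, hd, Bool.false_eq_true, if_false, h, Option.map_some]
          have hk : p + 1 + (j : Int) + 1 = p + (((j + 1 : Nat) : Nat) : Int) + 1 := by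
            push_cast; ring
          rw [hk]

-- B's flat fold over the first t chunks = the chunk-by-chunk bump fold
theorem loopB (data : List (List (String × Bool))) (t : Nat) (c0 : PySem.Dict Int Int)
    (hle : 5*t ≤ data.length) :
    (data.take (5*t)).foldl stepB (c0, 0, false)
      = ((List.range t).foldl (fun c i => pvBump c (pvOutN data i)) c0, 0, false) := by
  induction t generalizing c0 with
  | zero => simp
  | succ t ih =>
    have hle' : 5*t ≤ data.length := by omega
    have hsplit : data.take (5*(t+1)) = data.take (5*t) ++ ((data.drop (5*t)).take 5) := by
      rw [show 5*(t+1) = 5*t + 5 by ring, List.take_add]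
    rw [hsplit, List.foldl_append, ih c0 hle', List.range_succ, List.foldl_append]
    have hclen : ((data.drop (5*t)).take 5).length = 5 := by
      simp
      omega
    rw [stepB_spec _ 0 _ (by omega) (by omega) (by rw [hclen]; omega)]
    simp only [List.foldl_cons, List.foldl_nil, pvOutN, pvBump]
    rcases pvFirst ((data.drop (5*t)).take 5) with _ | j <;> simp

-- pyRange 0 ↑m 1 as a mapped Nat range
theorem pyRange_cast (m : Nat) :
    PySem.List.pyRange 0 (m : Int) 1 = (List.range m).map (Nat.cast : Nat → Int) := by
  rw [PySem.List.pyRange_one]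
  simp

-- ===== VERDICT (by name: the statement is the Claim_ definition above) =====
theorem attempt_times_spec : Claim_equal_attempt_times := by
  intro data _ _
  show (pvCount
      ((PySem.List.pyRange 0 (PySem.Int.floordiv (data.length : Int) 5) 1).foldl (fun result i =>
        let ntries := PySem.List.slice data (some (i*5)) (some (i*5+5))
        let st := ntries.foldl (fun (st : Int × Bool) one =>
          let res := st.2 || pvLookup one
          ((if !res then st.1 + 1 else st.1), res)) (0, false)
        if st.2 then result ++ [st.1 + 1] else result) [])
      ((PySem.Dict.ofList [(1,0),(2,0),(3,0),(4,0),(5,0)]) : PySem.Dict Int Int)).items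
    = ((PySem.List.slice data none (some (PySem.Int.floordiv (data.length : Int) 5 * 5))).foldl
        stepB ((PySem.Dict.ofList [(1,0),(2,0),(3,0),(4,0),(5,0)] : PySem.Dict Int Int), 0, false)).1.items
  have htot : PySem.Int.floordiv (data.length : Int) 5 = ((data.length / 5 : Nat) : Int) := by
    exact_mod_cast PySem.Int.floordiv_natCast data.length 5
  have hslice : PySem.List.slice data none (some (PySem.Int.floordiv (data.length : Int) 5 * 5))
      = data.take (5 * (data.length / 5)) := by
    rw [htot, show (((data.length / 5 : Nat) : Int)) * 5 = ((5 * (data.length / 5) : Nat) : Int) by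
      push_cast; ring, PySem.List.slice_to_natCast]
  rw [hslice, loopB data (data.length / 5) _
        (by have := Nat.div_mul_le_self data.length 5; omega)]
  rw [htot, pyRange_cast, loopA, fuse]
  simp [pvCount]
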